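-- pv_equiv track=rewrite | github.com/merzoff1997-ops/hahahbdbe-r | bot/utils.py | format_contact_list
-- ===== SOURCE A (Python) =====
-- from typing import List, Tuple, Optional, Dict
--
-- def format_contact_list(contacts: List[Dict], contact_type: str = None) -> str:
--     """Форматирование списка обнаруженных контактов"""
--     if not contacts:
--         return "📭 Контакты не обнаружены"
--
--     contact_icons = {
--         "phone": "📞",
--         "email": "📧",
--         "telegram": "🔗",
--         "url": "🌐"
--     }
--
--     text = f"<b>Обнаруженные контакты</b>\n\n"
--
--     grouped_contacts = {}
--     for contact in contacts:
--         ctype = contact['contact_type']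
--         if ctype not in grouped_contacts:
--             grouped_contacts[ctype] = []
--         grouped_contacts[ctype].append(contact)
--
--     for ctype, items in grouped_contacts.items():
--         if contact_type and ctype != contact_type:
--             continue
--
--         icon = contact_icons.get(ctype, "📌")
--         text += f"{icon} <b>{ctype.upper()}</b>:\n"
--
--         unique_values = set(item['contact_value'] for item in items)
--         for value in sorted(unique_values):
--             text += f"  • {value}\n"
--         text += "\n"
--
--     return text
-- ===== SOURCE B (Python) =====
-- def format_contact_list(contacts, contact_type=None):
--     """Форматирование списка обнаруженных контактов"""
--     if not contacts:
--         return "📭 Контакты не обнаружены"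
--
--     contact_icons = {
--         "phone": "📞",
--         "email": "📧",
--         "telegram": "🔗",
--         "url": "🌐",
--     }
--
--     text = "<b>Обнаруженные контакты</b>\n\n"
--
--     # no dict-of-lists grouping: walk the first-seen-ordered distinct types,
--     # re-scanning the flat list once per emitted type
--     for ctype in dict.fromkeys(c['contact_type'] for c in contacts):
--         if contact_type and ctype != contact_type:
--             continue
--         text += f"{contact_icons.get(ctype, '📌')} <b>{ctype.upper()}</b>:\n"
--         for value in sorted({c['contact_value'] for c in contacts if c['contact_type'] == ctype}):
--             text += f"  • {value}\n"
--         text += "\n"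
--
--     return text
-- ===== Notes on version B (the rewrite author's own statement) =====
-- stated objective: alternative
-- what changed: B drops A's dict-of-lists grouping pass entirely: it dedups the contact types in first-seen order (dict.fromkeys) and, for each emitted type, collects that type's values with a filtering set comprehension over the flat list.
import Mathlib
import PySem

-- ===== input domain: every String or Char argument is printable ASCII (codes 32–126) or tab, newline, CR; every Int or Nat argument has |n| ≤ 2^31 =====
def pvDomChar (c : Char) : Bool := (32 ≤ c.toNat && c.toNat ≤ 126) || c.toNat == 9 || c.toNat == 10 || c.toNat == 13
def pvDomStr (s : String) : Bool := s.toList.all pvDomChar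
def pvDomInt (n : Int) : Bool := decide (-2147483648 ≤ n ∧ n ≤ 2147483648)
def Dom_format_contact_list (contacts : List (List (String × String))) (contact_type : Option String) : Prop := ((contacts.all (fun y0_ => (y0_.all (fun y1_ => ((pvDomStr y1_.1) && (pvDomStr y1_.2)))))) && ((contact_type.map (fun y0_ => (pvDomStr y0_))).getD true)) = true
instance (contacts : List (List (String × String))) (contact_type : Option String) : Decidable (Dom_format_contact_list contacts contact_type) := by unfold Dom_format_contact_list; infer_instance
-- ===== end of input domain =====

-- B replaces A's dict-of-lists grouping by a first-seen dedup of the types plus one filtering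
-- re-scan per emitted type (objective: alternative decomposition, same output).

-- shared tiny helpers: the same Python snippets occur verbatim in both programs
-- contact['contact_type'] / contact['contact_value'] (first-match lookup; Pre_ excludes the KeyError inputs)
def pvGetKey (c : List (String × String)) (k : String) : Option String := (PySem.Dict.mk c).get? k
def pvType (c : List (String × String)) : String := (pvGetKey c "contact_type").getD ""
def pvValue (c : List (String × String)) : String := (pvGetKey c "contact_value").getD ""
-- contact_icons.get(ctype, "📌")
def pvIcon (t : String) : String :=
  (PySem.Dict.ofList [("phone", "📞"), ("email", "📧"), ("telegram", "🔗"), ("url", "🌐")]).getD t "📌"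
-- 'if contact_type and ctype != contact_type' (None and "" are falsy)
def pvSkip (contact_type : Option String) (t : String) : Bool :=
  match contact_type with
  | none => false
  | some s => decide (s ≠ "") && decide (t ≠ s)

-- ===== PORT A =====
def format_contact_list (contacts : List (List (String × String))) (contact_type : Option String) : String :=
  if contacts = [] then "📭 Контакты не обнаружены"
  else
    let text := "<b>Обнаруженные контакты</b>\n\n"
    -- if ctype not in grouped: grouped[ctype] = []  (= setdefault), then grouped[ctype].append(contact)
    let grouped : PySem.Dict String (List (List (String × String))) :=
      contacts.foldl (fun g c =>
        let t := pvType c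
        let g := g.setdefault t []
        g.insert t (g.getD t [] ++ [c])) PySem.Dict.empty
    grouped.items.foldl (fun text p =>
      if pvSkip contact_type p.1 then text
      else
        let text := text ++ pvIcon p.1 ++ " <b>" ++ PySem.Str.upper p.1 ++ "</b>:\n"
        let uniq := PySem.Set.ofList (p.2.map (fun item => pvValue item))
        let text := (PySem.List.sorted uniq (fun v => v) false).foldl
          (fun tx v => tx ++ "  • " ++ v ++ "\n") text
        text ++ "\n") text

-- ===== PORT B =====
def format_contact_list_alt (contacts : List (List (String × String))) (contact_type : Option String) : String :=
  if contacts = [] then "📭 Контакты не обнаружены"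
  else
    -- dict.fromkeys(...) = first-seen ordered dedup of the types
    (PySem.List.dedup (contacts.map (fun c => pvType c))).foldl (fun text t =>
      if pvSkip contact_type t then text
      else
        let text := text ++ pvIcon t ++ " <b>" ++ PySem.Str.upper t ++ "</b>:\n"
        let text := (PySem.List.sorted
            (PySem.Set.ofList ((contacts.filter (fun c => pvType c == t)).map (fun c => pvValue c)))
            (fun v => v) false).foldl
          (fun tx v => tx ++ "  • " ++ v ++ "\n") text
        text ++ "\n") "<b>Обнаруженные контакты</b>\n\n"

-- ===== PRECONDITION & SPEC =====
-- Pre_ excludes exactly the KeyError inputs: a contact without 'contact_type', or a contact in an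
-- emitted (non-skipped) group without 'contact_value' — there Python A raises.
def Pre_format_contact_list (contacts : List (List (String × String))) (contact_type : Option String) : Prop :=
  ∀ c ∈ contacts, (pvGetKey c "contact_type").isSome = true ∧
    (pvSkip contact_type (pvType c) = false → (pvGetKey c "contact_value").isSome = true)
instance (contacts : List (List (String × String))) (contact_type : Option String) : Decidable (Pre_format_contact_list contacts contact_type) := by unfold Pre_format_contact_list; infer_instance
def pvWitness_format_contact_list : (List (List (String × String))) × Option String :=
  ([[("contact_type", "phone"), ("contact_value", "a")]], none)

def Spec_format_contact_list (contacts : List (List (String × String))) (contact_type : Option String) (out : String) : Prop := out = format_contact_list_alt contacts contact_type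
instance (contacts : List (List (String × String))) (contact_type : Option String) (out : String) : Decidable (Spec_format_contact_list contacts contact_type out) := by unfold Spec_format_contact_list; infer_instance

-- ===== CLAIM (what is proved, stated in full; the proofs are below) =====
def Claim_equal_format_contact_list : Prop := ∀ (contacts : List (List (String × String))) (contact_type : Option String), Dom_format_contact_list contacts contact_type → Pre_format_contact_list contacts contact_type → Spec_format_contact_list contacts contact_type (format_contact_list contacts contact_type)

-- ===== LEMMAS AND PROOFS =====

-- A's two-line group-insertion step is Python's d.modify (one d[k] = f(d.get(k, [])) update)
lemma pv_step_eq_modify (g : PySem.Dict String (List (List (String × String)))) (t : String)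
    (c : List (String × String)) :
    (let g' := g.setdefault t []; g'.insert t (g'.getD t [] ++ [c])) = g.modify t [] (· ++ [c]) := by
  by_cases h : g.contains t = true
  · rw [PySem.Dict.setdefault_of_contains g [] h]
    simp only [PySem.Dict.modify]
  · rw [PySem.Dict.setdefault_of_not_contains g [] (by simpa using h)]
    simp only [PySem.Dict.getD_insert_self, PySem.Dict.insert_insert_self, PySem.Dict.modify,
      PySem.Dict.getD_of_not_contains g [] (by simpa using h), List.nil_append]

-- A's grouped dict lists, in insertion order, each type with its contacts in input order
lemma pv_grouped_items (contacts : List (List (String × String))) :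
    (contacts.foldl (fun g c =>
        let t := pvType c
        let g := g.setdefault t []
        g.insert t (g.getD t [] ++ [c])) PySem.Dict.empty).items
      = (PySem.List.dedup (contacts.map (fun c => pvType c))).map
          (fun t => (t, contacts.filter (fun c => pvType c == t))) := by
  rw [PySem.List.foldl_congr_mem _ _ _ _ (fun g c _ => pv_step_eq_modify g (pvType c) c)]
  have hfm : (contacts.map (fun c => (pvType c, c))).foldl
      (fun d p => d.modify p.1 [] (· ++ [p.2])) PySem.Dict.empty
      = List.foldl (fun g c => g.modify (pvType c) [] (· ++ [c])) PySem.Dict.empty contacts := by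
    rw [List.foldl_map]
  rw [← hfm]
  have hnd : ((contacts.map (fun c => (pvType c, c))).foldl
      (fun d p => d.modify p.1 [] (· ++ [p.2])) PySem.Dict.empty).keys.Nodup := by
    exact PySem.Dict.nodup_keys_foldl_modify_key
      (β := String × List (String × String)) _ (fun p => p.1) [] (fun _ p x => x ++ [p.2]) _
      (by simp [PySem.Dict.keys_empty])
  rw [PySem.Dict.items_eq_map_keys _ hnd []]
  have hkeys0 : (List.foldl (fun d p => d.modify p.1 [] fun x => x ++ [p.2]) PySem.Dict.empty
        (contacts.map (fun c => (pvType c, c)))).keys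
      = PySem.Set.update PySem.Dict.empty.keys
          ((contacts.map (fun c => (pvType c, c))).map (fun p => p.1)) :=
    PySem.Dict.keys_foldl_modify_key
      (β := String × List (String × String)) _ (fun p => p.1) [] (fun _ p x => x ++ [p.2]) _
  have hkeys : (List.foldl (fun d p => d.modify p.1 [] fun x => x ++ [p.2]) PySem.Dict.empty
        (contacts.map (fun c => (pvType c, c)))).keys
      = PySem.List.dedup (contacts.map (fun c => pvType c)) := by
    rw [hkeys0]
    simp only [PySem.Dict.keys_empty, List.map_map, PySem.List.dedup_eq_ofList,
      PySem.Set.ofList_eq_foldl, PySem.Set.update]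
    rfl
  rw [hkeys]
  apply List.map_congr_left
  intro t _
  rw [PySem.Dict.getD_foldl_modify_append]
  simp [List.filter_map, Function.comp_def, PySem.Dict.getD_empty]

theorem format_contact_list_spec : Claim_equal_format_contact_list := by
  intro contacts contact_type _ _
  unfold Spec_format_contact_list format_contact_list format_contact_list_alt
  by_cases h : contacts = []
  · simp [h]
  · simp only [if_neg h]
    rw [pv_grouped_items, List.foldl_map]
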